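-- pv_equiv track=rewrite | github.com/tinkerer-red/GMLC | _python/gml_gram_category_builder.py | compute_uncovered
-- ===== SOURCE A (Python) =====
-- from typing import Dict, List, Tuple, Set
--
-- def compute_uncovered(function_names: List[str],
--                       prefixes_map: Dict[str, str],
--                       sub_prefixes_map: Dict[str, Dict[str, str]]) -> List[str]:
--     uncovered_list: List[str] = []
--     for name_value in function_names:
--         name_lower = name_value.lower()
--         matched_flag = False
--         for subprefix_key in sorted(sub_prefixes_map.keys(), key=lambda s: len(s), reverse=True):
--             if name_lower.startswith(subprefix_key):
--                 matched_flag = True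
--                 break
--         if not matched_flag:
--             for prefix_key in prefixes_map.keys():
--                 if name_lower.startswith(prefix_key):
--                     matched_flag = True
--                     break
--         if not matched_flag:
--             uncovered_list.append(name_value)
--     uncovered_list.sort(key=lambda s: s.lower())
--     return uncovered_list
-- ===== SOURCE B (Python) =====
-- def compute_uncovered(function_names, prefixes_map, sub_prefixes_map):
--     prefix_set = set(sub_prefixes_map) | set(prefixes_map)
--
--     def covered(nl):
--         return any(nl[:k] in prefix_set for k in range(len(nl) + 1))
--
--     return sorted((n for n in function_names if not covered(n.lower())),
--                   key=str.lower)
-- ===== Notes on version B (the rewrite author's own statement) =====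
-- stated objective: faster
-- what changed: Instead of scanning every (length-sorted) sub-prefix key and then every prefix key with startswith for each name, B puts all keys into one hash set built once and tests each initial slice of the lowercased name for membership, then sorts the surviving names.
import Mathlib
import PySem

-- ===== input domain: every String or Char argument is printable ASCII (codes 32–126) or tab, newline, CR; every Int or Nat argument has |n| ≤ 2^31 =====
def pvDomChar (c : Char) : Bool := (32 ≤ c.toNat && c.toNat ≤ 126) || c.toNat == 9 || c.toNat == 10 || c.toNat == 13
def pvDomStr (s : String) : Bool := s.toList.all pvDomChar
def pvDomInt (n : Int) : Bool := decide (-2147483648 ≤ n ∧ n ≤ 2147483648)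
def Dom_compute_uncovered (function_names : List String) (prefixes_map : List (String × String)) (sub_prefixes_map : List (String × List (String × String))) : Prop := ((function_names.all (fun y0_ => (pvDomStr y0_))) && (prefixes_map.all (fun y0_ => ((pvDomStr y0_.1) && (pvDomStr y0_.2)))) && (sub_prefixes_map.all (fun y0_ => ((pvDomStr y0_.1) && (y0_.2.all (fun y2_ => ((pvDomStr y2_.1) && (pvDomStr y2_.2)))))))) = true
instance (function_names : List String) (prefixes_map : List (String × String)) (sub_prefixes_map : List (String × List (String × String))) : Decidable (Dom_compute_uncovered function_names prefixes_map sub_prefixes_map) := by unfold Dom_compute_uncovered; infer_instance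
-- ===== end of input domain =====

-- B replaces A's per-name scan over all (length-sorted) prefix keys by a single hash-set of
-- all keys queried once per prefix of each name; objective: faster (no per-name pass over P keys).

-- ===== PORT A =====
-- literal transliteration of Source A: accumulate uncovered names with a foldl (the append-loop),
-- inner break-loops become `any` over the same key lists, then sort by lowercase.
def compute_uncovered (function_names : List String) (prefixes_map : List (String × String)) (sub_prefixes_map : List (String × List (String × String))) : List String :=
  let uncovered_list := function_names.foldl (fun acc name_value =>
    let name_lower := PySem.Str.lower name_value
    let matched_flag :=
      (PySem.List.sorted (PySem.List.dedup (sub_prefixes_map.map Prod.fst))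
          (fun s => PySem.Str.len s) true).any
        (fun subprefix_key => PySem.Str.startswith name_lower subprefix_key)
    let matched_flag := matched_flag ||
      (PySem.List.dedup (prefixes_map.map Prod.fst)).any
        (fun prefix_key => PySem.Str.startswith name_lower prefix_key)
    if !matched_flag then acc ++ [name_value] else acc) []
  PySem.List.sorted uncovered_list (fun s => PySem.Str.lower s) false

-- ===== PORT B =====
-- literal transliteration of Source B: one set of all keys, `covered` checks every prefix of the
-- lowercased name for membership, names filtered then sorted by lowercase.
def compute_uncovered_alt (function_names : List String) (prefixes_map : List (String × String)) (sub_prefixes_map : List (String × List (String × String))) : List String :=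
  let prefix_set : PySem.Set String :=
    PySem.Set.union (PySem.Set.ofList (sub_prefixes_map.map Prod.fst))
      (PySem.Set.ofList (prefixes_map.map Prod.fst))
  let covered := fun (nl : String) =>
    (PySem.List.pyRange 0 (PySem.Str.len nl + 1)).any
      (fun k => PySem.Set.contains prefix_set (PySem.Str.slice nl none (some k)))
  PySem.List.sorted
    (function_names.filter (fun n => ! covered (PySem.Str.lower n)))
    (fun s => PySem.Str.lower s) false

-- ===== PRECONDITION & SPEC =====
def Spec_compute_uncovered (function_names : List String) (prefixes_map : List (String × String)) (sub_prefixes_map : List (String × List (String × String))) (out : List String) : Prop := out = compute_uncovered_alt function_names prefixes_map sub_prefixes_map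
instance (function_names : List String) (prefixes_map : List (String × String)) (sub_prefixes_map : List (String × List (String × String))) (out : List String) : Decidable (Spec_compute_uncovered function_names prefixes_map sub_prefixes_map out) := by unfold Spec_compute_uncovered; infer_instance

-- ===== CLAIM (what is proved, stated in full; the proofs are below) =====
def Claim_equal_compute_uncovered : Prop := ∀ (function_names : List String) (prefixes_map : List (String × String)) (sub_prefixes_map : List (String × List (String × String))), Dom_compute_uncovered function_names prefixes_map sub_prefixes_map → Spec_compute_uncovered function_names prefixes_map sub_prefixes_map (compute_uncovered function_names prefixes_map sub_prefixes_map)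

-- ===== LEMMAS AND PROOFS =====

-- Core: "some key in P is a prefix of nl" (A's startswith scan) equals
-- "some initial slice of nl is in P" (B's membership test).
theorem exists_slice_mem_iff (nl : String) (P : List String) :
    (∃ k : Int, (0 ≤ k ∧ k < PySem.Str.len nl + 1) ∧ PySem.Str.slice nl none (some k) ∈ P)
      ↔ ∃ p ∈ P, PySem.Str.startswith nl p = true := by
  constructor
  · rintro ⟨k, ⟨hk0, _⟩, hmem⟩
    refine ⟨_, hmem, ?_⟩
    have hts : (PySem.Str.slice nl none (some k)).toList = nl.toList.take k.toNat := by
      simp [PySem.Str.slice, PySem.List.slice_to _ hk0]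
    simp only [PySem.Str.startswith_eq, PySem.Chars.startswith_iff, hts]
    exact List.take_prefix _ _
  · rintro ⟨p, hp, hsw⟩
    have hpre : p.toList <+: nl.toList := by
      simpa [PySem.Chars.startswith_iff] using hsw
    refine ⟨(p.toList.length : Int), ⟨by positivity, ?_⟩, ?_⟩
    · have := hpre.length_le
      rw [PySem.Str.len_eq]
      omega
    · have hts : (PySem.Str.slice nl none (some (p.toList.length : Int))).toList
          = nl.toList.take p.toList.length := by
        simp [PySem.Str.slice]
      have : PySem.Str.slice nl none (some (p.toList.length : Int)) = p := by
        apply String.toList_inj.mp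
        rw [hts, ← List.prefix_iff_eq_take.mp hpre]
      rwa [this]

-- Pointwise: A's matched flag equals B's covered test on each name.
theorem matched_eq_covered (nl : String) (prefixes_map : List (String × String)) (sub_prefixes_map : List (String × List (String × String))) :
    ((PySem.List.sorted (PySem.List.dedup (sub_prefixes_map.map Prod.fst))
          (fun s => PySem.Str.len s) true).any
        (fun subprefix_key => PySem.Str.startswith nl subprefix_key) ||
      (PySem.List.dedup (prefixes_map.map Prod.fst)).any
        (fun prefix_key => PySem.Str.startswith nl prefix_key))
    = (PySem.List.pyRange 0 (PySem.Str.len nl + 1)).any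
        (fun k => PySem.Set.contains
          (PySem.Set.union (PySem.Set.ofList (sub_prefixes_map.map Prod.fst))
            (PySem.Set.ofList (prefixes_map.map Prod.fst)))
          (PySem.Str.slice nl none (some k))) := by
  apply Bool.coe_iff_coe.mp
  simp only [List.any_eq_true, Bool.or_eq_true, PySem.List.mem_sorted,
    PySem.List.dedup_eq_ofList, PySem.Set.mem_ofList, PySem.List.mem_pyRange_one,
    PySem.Set.contains_iff, PySem.Set.mem_union]
  rw [show (∃ k, (0 ≤ k ∧ k < PySem.Str.len nl + 1) ∧
        (PySem.Str.slice nl none (some k) ∈ sub_prefixes_map.map Prod.fst ∨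
         PySem.Str.slice nl none (some k) ∈ prefixes_map.map Prod.fst))
      ↔ ((∃ k, (0 ≤ k ∧ k < PySem.Str.len nl + 1) ∧
            PySem.Str.slice nl none (some k) ∈ sub_prefixes_map.map Prod.fst) ∨
          (∃ k, (0 ≤ k ∧ k < PySem.Str.len nl + 1) ∧
            PySem.Str.slice nl none (some k) ∈ prefixes_map.map Prod.fst)) by
    constructor
    · rintro ⟨k, hk, h | h⟩
      · exact Or.inl ⟨k, hk, h⟩
      · exact Or.inr ⟨k, hk, h⟩
    · rintro (⟨k, hk, h⟩ | ⟨k, hk, h⟩)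
      · exact ⟨k, hk, Or.inl h⟩
      · exact ⟨k, hk, Or.inr h⟩]
  rw [exists_slice_mem_iff, exists_slice_mem_iff]

-- ===== VERDICT (by name: the statement is the Claim_ definition above) =====
theorem compute_uncovered_spec : Claim_equal_compute_uncovered := by
  intro function_names prefixes_map sub_prefixes_map _
  unfold Spec_compute_uncovered compute_uncovered compute_uncovered_alt
  rw [show (fun (acc : List String) (name_value : String) =>
        let name_lower := PySem.Str.lower name_value
        let matched_flag :=
          (PySem.List.sorted (PySem.List.dedup (sub_prefixes_map.map Prod.fst))
              (fun s => PySem.Str.len s) true).any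
            (fun subprefix_key => PySem.Str.startswith name_lower subprefix_key)
        let matched_flag := matched_flag ||
          (PySem.List.dedup (prefixes_map.map Prod.fst)).any
            (fun prefix_key => PySem.Str.startswith name_lower prefix_key)
        if !matched_flag then acc ++ [name_value] else acc)
      = (fun acc x => if (fun n => !((PySem.List.pyRange 0 (PySem.Str.len (PySem.Str.lower n) + 1)).any
          (fun k => PySem.Set.contains
            (PySem.Set.union (PySem.Set.ofList (sub_prefixes_map.map Prod.fst))
              (PySem.Set.ofList (prefixes_map.map Prod.fst)))
            (PySem.Str.slice (PySem.Str.lower n) none (some k))))) x = true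
          then acc ++ [(fun y => y) x] else acc) from by
    funext acc x
    simp only []
    rw [matched_eq_covered]]
  rw [PySem.List.foldl_append_if]
  simp
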